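-- pv_equiv track=rewrite | github.com/kunal9922/DSA_Archive | Graph/graphRepresntaion.py | are_graphs_identical
-- ===== SOURCE A (Python) =====
-- def are_graphs_identical(adj_matrix, adj_list):
--     n = len(adj_matrix)
--     # Check if the number of vertices in the adjacency list matches the adjacency matrix
--     if len(adj_list) != n:
--         return False
--     # Iterate through each vertex
--     for i in range(n):
--         # Check if the number of neighbors in the adjacency list matches non-zero entries in the matrix
--         if len(adj_list[i]) != sum(1 for j in range(n) if adj_matrix[i][j] != 0):
--             return False
--         # Check if the neighbors listed in the adjacency list match non-zero entries in the matrix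
--         for j in range(n):
--             if adj_matrix[i][j] != 0 and j not in adj_list[i]:
--                 return False
--
--     return True
-- ===== SOURCE B (Python) =====
-- def are_graphs_identical(adj_matrix, adj_list):
--     n = len(adj_matrix)
--     if len(adj_list) != n:
--         return False
--     # Flatten each representation into its global multiset of directed edges,
--     # canonicalize by sorting, and compare once.
--     matrix_edges = sorted((i, j)
--                           for i, row in enumerate(adj_matrix)
--                           for j, v in enumerate(row[:n]) if v != 0)
--     list_edges = sorted((i, j)
--                         for i, nbrs in enumerate(adj_list)
--                         for j in nbrs)
--     return matrix_edges == list_edges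
-- ===== Notes on version B (the rewrite author's own statement) =====
-- stated objective: alternative
-- what changed: B flattens both representations into global edge lists ((i,j) pairs: non-zero matrix cells vs adjacency-list entries), sorts both, and compares them once, replacing A's per-row counting pass plus per-column membership scans.
-- outside the precondition, e.g. on are_graphs_identical([[0, 0], [0]], [[1], []]): A returns False, B returns False
import Mathlib
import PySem

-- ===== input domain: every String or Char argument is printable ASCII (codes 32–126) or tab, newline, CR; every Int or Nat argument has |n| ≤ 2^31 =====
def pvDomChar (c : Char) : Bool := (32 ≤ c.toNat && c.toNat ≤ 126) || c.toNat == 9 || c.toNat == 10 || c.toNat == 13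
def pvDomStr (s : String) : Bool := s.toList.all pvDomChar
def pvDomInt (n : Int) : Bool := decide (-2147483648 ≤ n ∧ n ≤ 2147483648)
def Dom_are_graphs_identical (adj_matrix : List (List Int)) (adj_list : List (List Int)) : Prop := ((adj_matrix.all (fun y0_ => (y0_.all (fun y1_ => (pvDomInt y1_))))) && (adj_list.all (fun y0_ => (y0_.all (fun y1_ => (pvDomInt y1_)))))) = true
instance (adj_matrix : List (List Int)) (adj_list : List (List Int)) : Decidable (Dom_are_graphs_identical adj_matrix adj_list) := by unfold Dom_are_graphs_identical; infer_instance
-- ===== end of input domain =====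

-- B flattens both representations into global sorted edge lists and compares them once,
-- instead of A's per-row counting pass plus per-column membership scans (objective: alternative).

-- ===== PORT A =====
def are_graphs_identical (adj_matrix : List (List Int)) (adj_list : List (List Int)) : Bool :=
  let n := adj_matrix.length
  if adj_list.length ≠ n then false else
  (List.range n).all (fun i =>
    let row := PySem.List.pyGetD adj_matrix (Int.ofNat i) []
    let nbrs := PySem.List.pyGetD adj_list (Int.ofNat i) []
    decide (nbrs.length =
        ((List.range n).filter (fun j => decide (PySem.List.pyGetD row (Int.ofNat j) 0 ≠ 0))).length)
    && (List.range n).all (fun j =>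
         !(decide (PySem.List.pyGetD row (Int.ofNat j) 0 ≠ 0) && !nbrs.contains (Int.ofNat j))))

-- ===== PORT B =====
def are_graphs_identical_alt (adj_matrix : List (List Int)) (adj_list : List (List Int)) : Bool :=
  let n := adj_matrix.length
  if adj_list.length ≠ n then false else
  let matrix_edges := PySem.List.sorted2
    ((PySem.List.enumerate adj_matrix 0).flatMap (fun p =>
      (PySem.List.enumerate (PySem.List.slice p.2 none (some (n : Int))) 0).filterMap
        (fun q => if q.2 ≠ 0 then some (p.1, q.1) else none)))
    Prod.fst Prod.snd
  let list_edges := PySem.List.sorted2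
    ((PySem.List.enumerate adj_list 0).flatMap (fun p => p.2.map (fun j => (p.1, j))))
    Prod.fst Prod.snd
  matrix_edges == list_edges

-- ===== PRECONDITION & SPEC =====
-- Pre_ excludes ragged matrices (when the list length matches, some matrix row shorter than the
-- vertex count): on those A raises IndexError as soon as its column scan reaches such a row
-- (it may still return False earlier, which B also returns — see cites).
def Pre_are_graphs_identical (adj_matrix : List (List Int)) (adj_list : List (List Int)) : Prop :=
  adj_list.length = adj_matrix.length → ∀ row ∈ adj_matrix, adj_matrix.length ≤ row.length
instance (adj_matrix : List (List Int)) (adj_list : List (List Int)) : Decidable (Pre_are_graphs_identical adj_matrix adj_list) := by unfold Pre_are_graphs_identical; infer_instance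
def pvWitness_are_graphs_identical : List (List Int) × List (List Int) :=
  ([[0, 1], [1, 0]], [[1], [0]])

def Spec_are_graphs_identical (adj_matrix : List (List Int)) (adj_list : List (List Int)) (out : Bool) : Prop := out = are_graphs_identical_alt adj_matrix adj_list
instance (adj_matrix : List (List Int)) (adj_list : List (List Int)) (out : Bool) : Decidable (Spec_are_graphs_identical adj_matrix adj_list out) := by unfold Spec_are_graphs_identical; infer_instance

-- ===== CLAIM (what is proved, stated in full; the proofs are below) =====
def Claim_equal_are_graphs_identical : Prop := ∀ (adj_matrix : List (List Int)) (adj_list : List (List Int)), Dom_are_graphs_identical adj_matrix adj_list → Pre_are_graphs_identical adj_matrix adj_list → Spec_are_graphs_identical adj_matrix adj_list (are_graphs_identical adj_matrix adj_list)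

-- ===== LEMMAS AND PROOFS =====

-- the strict lexicographic "before" relation sorted2 Prod.fst Prod.snd sorts by
def pvLt (a b : Int × Int) : Bool :=
  decide (a.1 < b.1) || !decide (b.1 < a.1) && decide (a.2 < b.2)

-- its reflection: pvLt b a = false iff a ≤lex b
theorem pvLt_false_iff (a b : Int × Int) :
    pvLt b a = false ↔ (a.1 < b.1 ∨ (a.1 = b.1 ∧ a.2 ≤ b.2)) := by
  unfold pvLt
  rcases a with ⟨a1, a2⟩; rcases b with ⟨b1, b2⟩
  simp only [Bool.or_eq_false_iff, Bool.and_eq_false_iff, Bool.not_eq_false',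
    decide_eq_false_iff_not, decide_eq_true_eq]
  omega

theorem pvLt_true_iff (a b : Int × Int) :
    pvLt a b = true ↔ (a.1 < b.1 ∨ (a.1 = b.1 ∧ a.2 < b.2)) := by
  unfold pvLt
  rcases a with ⟨a1, a2⟩; rcases b with ⟨b1, b2⟩
  simp only [Bool.or_eq_true, Bool.and_eq_true, decide_eq_true_eq, Bool.not_eq_true',
    decide_eq_false_iff_not]
  omega

-- the lex order the sorted output is pairwise in
def pvLe (a b : Int × Int) : Prop := a.1 < b.1 ∨ (a.1 = b.1 ∧ a.2 ≤ b.2)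

theorem pvLe_antisymm {a b : Int × Int} (h1 : pvLe a b) (h2 : pvLe b a) : a = b := by
  rcases a with ⟨a1, a2⟩; rcases b with ⟨b1, b2⟩
  unfold pvLe at h1 h2; simp only [Prod.mk.injEq]
  omega

theorem pv_insertBy_pairwise (x : Int × Int) (ys : List (Int × Int))
    (h : ys.Pairwise pvLe) : (PySem.List.insertBy pvLt x ys).Pairwise pvLe := by
  induction ys with
  | nil => simp [PySem.List.insertBy]
  | cons y ys ih =>
    rw [List.pairwise_cons] at h
    by_cases hxy : pvLt x y = true
    · rw [show PySem.List.insertBy pvLt x (y :: ys) = x :: y :: ys by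
        simp [PySem.List.insertBy, hxy]]
      have hxyle : pvLe x y := by
        have := (pvLt_true_iff x y).mp hxy; unfold pvLe; omega
      refine List.pairwise_cons.mpr ⟨?_, List.pairwise_cons.mpr ⟨h.1, h.2⟩⟩
      intro z hz
      rcases List.mem_cons.mp hz with rfl | hz
      · exact hxyle
      · have hyz := h.1 z hz
        unfold pvLe at hxyle hyz ⊢; omega
    · rw [show PySem.List.insertBy pvLt x (y :: ys) = y :: PySem.List.insertBy pvLt x ys by
        simp [PySem.List.insertBy, hxy]]
      refine List.pairwise_cons.mpr ⟨?_, ih h.2⟩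
      intro z hz
      rcases (PySem.List.insertBy_mem_iff pvLt x z ys).mp hz with rfl | hz
      · exact (pvLt_false_iff y _).mp (Bool.eq_false_iff.mpr hxy)
      · exact h.1 z hz

theorem pv_foldl_insertBy_pairwise (xs : List (Int × Int)) :
    ∀ acc : List (Int × Int), acc.Pairwise pvLe →
      (xs.foldl (fun acc x => PySem.List.insertBy pvLt x acc) acc).Pairwise pvLe := by
  induction xs with
  | nil => intro acc h; simpa using h
  | cons x xs ih =>
    intro acc h
    exact ih _ (pv_insertBy_pairwise x acc h)

theorem pv_sorted2_eq_foldl (xs : List (Int × Int)) :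
    PySem.List.sorted2 xs Prod.fst Prod.snd
      = xs.foldl (fun acc x => PySem.List.insertBy pvLt x acc) [] := rfl

theorem pv_sorted2_pairwise (xs : List (Int × Int)) :
    (PySem.List.sorted2 xs Prod.fst Prod.snd).Pairwise pvLe := by
  rw [pv_sorted2_eq_foldl]
  exact pv_foldl_insertBy_pairwise xs [] (by simp)

-- sorted(xs) == sorted(ys) on Int pairs decides multiset equality
theorem pv_sorted2_eq_iff (xs ys : List (Int × Int)) :
    PySem.List.sorted2 xs Prod.fst Prod.snd = PySem.List.sorted2 ys Prod.fst Prod.snd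
      ↔ xs.Perm ys := by
  constructor
  · intro h
    have h1 := PySem.List.sorted2_perm xs Prod.fst Prod.snd false
    have h2 := PySem.List.sorted2_perm ys Prod.fst Prod.snd false
    exact h1.symm.trans (h ▸ h2)
  · intro h
    have hp : (PySem.List.sorted2 xs Prod.fst Prod.snd).Perm
        (PySem.List.sorted2 ys Prod.fst Prod.snd) :=
      (PySem.List.sorted2_perm xs Prod.fst Prod.snd false).trans
        (h.trans (PySem.List.sorted2_perm ys Prod.fst Prod.snd false).symm)
    exact hp.eq_of_pairwise (fun a b _ _ h1 h2 => pvLe_antisymm h1 h2)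
      (pv_sorted2_pairwise xs) (pv_sorted2_pairwise ys)

-- every edge produced from a tail of enumerate has a tag ≥ the start value
theorem pv_tag_ge (f : List Int → List Int) (s : Int) (rs : List (List Int)) :
    ∀ p ∈ (PySem.List.enumerate rs s).flatMap (fun p => (f p.2).map (fun j => (p.1, j))),
      s ≤ p.1 := by
  intro p hp
  rcases List.mem_flatMap.mp hp with ⟨q, hq, hpq⟩
  rcases (PySem.List.mem_enumerate_iff rs s q).mp hq with ⟨k, hk, rfl⟩
  rcases List.mem_map.mp hpq with ⟨j, _, rfl⟩
  simp

-- global edge-multiset equality decomposes into rowwise multiset equality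
theorem pv_flatMap_perm_iff (fa fb : List Int → List Int) :
    ∀ (s : Int) (ra rb : List (List Int)), ra.length = rb.length →
    (((PySem.List.enumerate ra s).flatMap (fun p => (fa p.2).map (fun j => (p.1, j)))).Perm
      ((PySem.List.enumerate rb s).flatMap (fun p => (fb p.2).map (fun j => (p.1, j))))
    ↔ ∀ (i : Nat) (h1 : i < ra.length) (h2 : i < rb.length), (fa ra[i]).Perm (fb rb[i])) := by
  intro s ra
  induction ra generalizing s with
  | nil =>
    intro rb hlen
    rw [List.length_eq_zero_iff.mp hlen.symm]
    simp [PySem.List.enumerate]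
  | cons a ra ih =>
    intro rb hlen
    cases rb with
    | nil => simp at hlen
    | cons b rb =>
      have hlen' : ra.length = rb.length := by simpa using hlen
      rw [PySem.List.enumerate_cons, PySem.List.enumerate_cons]
      simp only [List.flatMap_cons]
      constructor
      · intro h
        -- filter by the head tag s to split off the first blocks
        have hA0 : ((fa a).map (fun j => (s, j))).filter (fun p => decide (p.1 = s))
            = (fa a).map (fun j => (s, j)) := by
          apply List.filter_eq_self.mpr; intro p hp
          rcases List.mem_map.mp hp with ⟨j, _, rfl⟩; simp
        have hB0 : ((fb b).map (fun j => (s, j))).filter (fun p => decide (p.1 = s))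
            = (fb b).map (fun j => (s, j)) := by
          apply List.filter_eq_self.mpr; intro p hp
          rcases List.mem_map.mp hp with ⟨j, _, rfl⟩; simp
        have hA1 : ((PySem.List.enumerate ra (s+1)).flatMap
              (fun p => (fa p.2).map (fun j => (p.1, j)))).filter (fun p => decide (p.1 = s))
            = [] := by
          apply List.filter_eq_nil_iff.mpr; intro p hp
          have := pv_tag_ge fa (s+1) ra p hp; simp; omega
        have hB1 : ((PySem.List.enumerate rb (s+1)).flatMap
              (fun p => (fb p.2).map (fun j => (p.1, j)))).filter (fun p => decide (p.1 = s))
            = [] := by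
          apply List.filter_eq_nil_iff.mpr; intro p hp
          have := pv_tag_ge fb (s+1) rb p hp; simp; omega
        have hA2 : ((fa a).map (fun j => (s, j))).filter (fun p => !decide (p.1 = s)) = [] := by
          apply List.filter_eq_nil_iff.mpr; intro p hp
          rcases List.mem_map.mp hp with ⟨j, _, rfl⟩; simp
        have hB2 : ((fb b).map (fun j => (s, j))).filter (fun p => !decide (p.1 = s)) = [] := by
          apply List.filter_eq_nil_iff.mpr; intro p hp
          rcases List.mem_map.mp hp with ⟨j, _, rfl⟩; simp
        have hA3 : ((PySem.List.enumerate ra (s+1)).flatMap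
              (fun p => (fa p.2).map (fun j => (p.1, j)))).filter (fun p => !decide (p.1 = s))
            = (PySem.List.enumerate ra (s+1)).flatMap (fun p => (fa p.2).map (fun j => (p.1, j))) := by
          apply List.filter_eq_self.mpr; intro p hp
          have := pv_tag_ge fa (s+1) ra p hp; simp; omega
        have hB3 : ((PySem.List.enumerate rb (s+1)).flatMap
              (fun p => (fb p.2).map (fun j => (p.1, j)))).filter (fun p => !decide (p.1 = s))
            = (PySem.List.enumerate rb (s+1)).flatMap (fun p => (fb p.2).map (fun j => (p.1, j))) := by
          apply List.filter_eq_self.mpr; intro p hp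
          have := pv_tag_ge fb (s+1) rb p hp; simp; omega
        have hhead : ((fa a).map (fun j => (s, j))).Perm ((fb b).map (fun j => (s, j))) := by
          have := h.filter (fun p => decide (p.1 = s))
          rwa [List.filter_append, List.filter_append, hA0, hB0, hA1, hB1,
            List.append_nil, List.append_nil] at this
        have htail := by
          have := h.filter (fun p => !decide (p.1 = s))
          rwa [List.filter_append, List.filter_append, hA2, hB2, hA3, hB3,
            List.nil_append, List.nil_append] at this
        intro i h1 h2
        match i with
        | 0 =>
          have := hhead.map Prod.snd
          simpa [List.map_map, Function.comp_def] using this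
        | Nat.succ i =>
          exact (ih (s+1) rb hlen').mp htail i (by simpa using h1) (by simpa using h2)
      · intro h
        refine List.Perm.append ?_ ?_
        · exact (h 0 (by simp) (by simp)).map _
        · exact (ih (s+1) rb hlen').mpr (fun i h1 h2 => h (i+1) (by simpa using h1) (by simpa using h2))

-- the pair-producing filterMap factors through the index filterMap
theorem pv_filterMap_factor (i : Int) (t : List Int) :
    (PySem.List.enumerate t 0).filterMap (fun q => if q.2 ≠ 0 then some (i, q.1) else none)
      = ((PySem.List.enumerate t 0).filterMap (fun q => if q.2 ≠ 0 then some q.1 else none)).map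
          (fun j => (i, j)) := by
  rw [List.map_filterMap]
  apply List.filterMap_congr
  intro q _
  by_cases hq : q.2 = 0 <;> simp [hq]

-- the non-zero-index list of a list, by enumerate, equals the filtered index range (mapped to Int)
theorem pv_enum_filterMap (t : List Int) :
    (PySem.List.enumerate t 0).filterMap (fun q => if q.2 ≠ 0 then some q.1 else none)
      = ((List.range t.length).filter (fun j => decide (t.getD j 0 ≠ 0))).map Int.ofNat := by
  induction t using List.reverseRecOn with
  | nil => simp [PySem.List.enumerate]
  | append_singleton t x ih =>
    rw [PySem.List.enumerate_append, List.filterMap_append, ih]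
    simp only [List.length_append, List.length_singleton, List.range_succ, List.filter_append,
      List.map_append]
    congr 1
    · congr 1
      apply List.filter_congr
      intro j hj
      have hj' : j < t.length := List.mem_range.mp hj
      simp [List.getD_eq_getElem?_getD, List.getElem?_append_left hj']
    · have h0 : (t ++ [x]).getD t.length 0 = x := by
        simp [List.getD_eq_getElem?_getD]
      by_cases hx : x = 0
      · simp [PySem.List.enumerate, hx]
      · simp [PySem.List.enumerate, hx]

-- A's row check passes iff the row's non-zero index list is a permutation of the listed neighbors
theorem pv_row_iff (n : Nat) (nbrs row : List Int) (h : n ≤ row.length) :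
    (decide (nbrs.length =
        ((List.range n).filter (fun j => decide (PySem.List.pyGetD row (Int.ofNat j) 0 ≠ 0))).length)
    && (List.range n).all (fun j =>
         !(decide (PySem.List.pyGetD row (Int.ofNat j) 0 ≠ 0) && !nbrs.contains (Int.ofNat j)))) = true
    ↔ (((List.range n).filter (fun j => decide ((row.take n).getD j 0 ≠ 0))).map Int.ofNat).Perm nbrs := by
  set t := row.take n with ht
  have htlen : t.length = n := by simp [ht, h]
  have hget : ∀ j ∈ List.range n, PySem.List.pyGetD row (Int.ofNat j) 0 = t.getD j 0 := by
    intro j hj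
    have hj' : j < n := List.mem_range.mp hj
    have : (Int.ofNat j) = ((j : Nat) : Int) := rfl
    rw [this, PySem.List.pyGetD_natCast]
    simp [ht, List.getD_eq_getElem?_getD, List.getElem?_take_of_lt hj']
  set M : List Int := ((List.range n).filter (fun j => decide (t.getD j 0 ≠ 0))).map Int.ofNat with hM
  have hMnodup : M.Nodup := by
    refine List.Nodup.map ?_ (List.Nodup.filter _ (List.nodup_range))
    intro a b hab
    exact Int.ofNat.inj hab
  have hcnt : ((List.range n).filter (fun j => decide (PySem.List.pyGetD row (Int.ofNat j) 0 ≠ 0))).length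
      = M.length := by
    rw [hM, List.length_map]
    congr 1
    apply List.filter_congr
    intro j hj
    rw [hget j hj]
  have hmemM : ∀ x : Int, x ∈ M ↔ ∃ j ∈ List.range n, t.getD j 0 ≠ 0 ∧ x = Int.ofNat j := by
    intro x
    simp only [hM, List.mem_map, List.mem_filter, decide_eq_true_eq]
    constructor
    · rintro ⟨j, ⟨hj, hne⟩, rfl⟩; exact ⟨j, hj, hne, rfl⟩
    · rintro ⟨j, hj, hne, rfl⟩; exact ⟨j, ⟨hj, hne⟩, rfl⟩
  rw [hcnt, Bool.and_eq_true, decide_eq_true_eq]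
  constructor
  · rintro ⟨hlen, hall⟩
    have hsub : M ⊆ nbrs := by
      intro x hx
      obtain ⟨j, hj, hne, rfl⟩ := (hmemM x).mp hx
      have := List.all_eq_true.mp hall j hj
      rw [hget j hj] at this
      simp only [Bool.not_eq_eq_eq_not, Bool.not_true, Bool.and_eq_false_imp,
        decide_eq_true_eq] at this
      simpa using this hne
    exact (List.Nodup.subperm hMnodup hsub).perm_of_length_le (le_of_eq hlen)
  · intro hperm
    refine ⟨(hperm.length_eq).symm, ?_⟩
    apply List.all_eq_true.mpr
    intro j hj
    rw [hget j hj]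
    simp only [Bool.not_eq_eq_eq_not, Bool.not_true, Bool.and_eq_false_imp, decide_eq_true_eq]
    intro hne
    have : (Int.ofNat j) ∈ M := (hmemM _).mpr ⟨j, hj, hne, rfl⟩
    simpa using hperm.mem_iff.mp this

theorem pv_flatMap_congr {α β : Type} (l : List α) {f g : α → List β}
    (h : ∀ x ∈ l, f x = g x) : l.flatMap f = l.flatMap g := by
  induction l with
  | nil => rfl
  | cons a l ih =>
    simp only [List.flatMap_cons, h a (by simp), ih (fun x hx => h x (by simp [hx]))]

-- ===== VERDICT (by name: the statement is the Claim_ definition above) =====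
theorem are_graphs_identical_spec : Claim_equal_are_graphs_identical := by
  intro adj_matrix adj_list _ hpre
  unfold Spec_are_graphs_identical are_graphs_identical are_graphs_identical_alt
  by_cases hl : adj_list.length = adj_matrix.length
  · simp only [hl, ne_eq, not_true_eq_false, if_false]
    have hrows := hpre hl
    set n := adj_matrix.length with hn
    -- rewrite B's matrix side into the tagged-row-map form
    have hfac : ∀ p : Int × List Int, n ≤ p.2.length →
        (PySem.List.enumerate (PySem.List.slice p.2 none (some (n : Int))) 0).filterMap
          (fun q => if q.2 ≠ 0 then some (p.1, q.1) else none)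
        = ((fun row => ((List.range n).filter (fun j => decide ((row.take n).getD j 0 ≠ 0))).map Int.ofNat) p.2).map
            (fun j => (p.1, j)) := by
      intro p hc
      rw [PySem.List.slice_to_natCast, pv_filterMap_factor, pv_enum_filterMap]
      have : (p.2.take n).length = n := by simp [hc]
      rw [this]
    have hrwB : ((PySem.List.enumerate adj_matrix 0).flatMap (fun p =>
        (PySem.List.enumerate (PySem.List.slice p.2 none (some (n : Int))) 0).filterMap
          (fun q => if q.2 ≠ 0 then some (p.1, q.1) else none)))
        = ((PySem.List.enumerate adj_matrix 0).flatMap (fun p =>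
          ((fun row => ((List.range n).filter (fun j => decide ((row.take n).getD j 0 ≠ 0))).map Int.ofNat) p.2).map
            (fun j => (p.1, j)))) := by
      apply pv_flatMap_congr
      intro p hp
      rcases (PySem.List.mem_enumerate_iff adj_matrix 0 p).mp hp with ⟨k, hk, rfl⟩
      exact hfac _ (hrows _ (List.getElem_mem hk))
    rw [hrwB]
    rw [Bool.beq_eq_decide_eq]
    rw [Bool.eq_iff_iff, List.all_eq_true, decide_eq_true_iff]
    rw [pv_sorted2_eq_iff,
      pv_flatMap_perm_iff (fun row => ((List.range n).filter (fun j => decide ((row.take n).getD j 0 ≠ 0))).map Int.ofNat)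
        (fun nbrs => nbrs) 0 adj_matrix adj_list (by omega)]
    constructor
    · intro h i h1 h2
      have hi := h i (List.mem_range.mpr h1)
      have hgm : PySem.List.pyGetD adj_matrix (Int.ofNat i) [] = adj_matrix[i] := by
        have : (Int.ofNat i) = ((i : Nat) : Int) := rfl
        rw [this, PySem.List.pyGetD_natCast]
        simp [List.getD_eq_getElem?_getD, List.getElem?_eq_getElem h1]
      have hgl : PySem.List.pyGetD adj_list (Int.ofNat i) [] = adj_list[i] := by
        have : (Int.ofNat i) = ((i : Nat) : Int) := rfl
        rw [this, PySem.List.pyGetD_natCast]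
        simp [List.getD_eq_getElem?_getD, List.getElem?_eq_getElem h2]
      rw [hgm, hgl] at hi
      exact (pv_row_iff n adj_list[i] adj_matrix[i] (hrows _ (List.getElem_mem h1))).mp hi
    · intro h i hi
      have h1 : i < adj_matrix.length := List.mem_range.mp hi
      have h2 : i < adj_list.length := by omega
      have hgm : PySem.List.pyGetD adj_matrix (Int.ofNat i) [] = adj_matrix[i] := by
        have : (Int.ofNat i) = ((i : Nat) : Int) := rfl
        rw [this, PySem.List.pyGetD_natCast]
        simp [List.getD_eq_getElem?_getD, List.getElem?_eq_getElem h1]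
      have hgl : PySem.List.pyGetD adj_list (Int.ofNat i) [] = adj_list[i] := by
        have : (Int.ofNat i) = ((i : Nat) : Int) := rfl
        rw [this, PySem.List.pyGetD_natCast]
        simp [List.getD_eq_getElem?_getD, List.getElem?_eq_getElem h2]
      rw [hgm, hgl]
      exact (pv_row_iff n adj_list[i] adj_matrix[i] (hrows _ (List.getElem_mem h1))).mpr (h i h1 h2)
  · simp [hl]
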